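-- pv_equiv track=rewrite | github.com/stakiran/incl | incl.py | search_func
-- ===== SOURCE A (Python) =====
-- def search_func(strlist, queries_by_str):
--     """ lower and AND-searching. """
--     queries = queries_by_str.split(' ')
--
--     if len(queries)==0:
--         return strlist
--
--     firstq = queries[0]
--     if len(firstq)==0:
--         return strlist
--     if firstq[0]==' ':
--         return strlist
--
--     ret = []
--     for original_line in strlist:
--         line = original_line.lower()
--
--         is_matched = True
--         for query in queries:
--             if line.find(query)==-1:
--                 is_matched = False
--                 break
--         if is_matched:
--             ret.append(original_line)
--
--     return ret
-- ===== SOURCE B (Python) =====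
-- def search_func(strlist, queries_by_str):
--     """ lower and AND-searching (progressive narrowing: one filtering pass per query). """
--     queries = queries_by_str.split(' ')
--
--     if len(queries) == 0:
--         return strlist
--
--     firstq = queries[0]
--     if len(firstq) == 0:
--         return strlist
--     if firstq[0] == ' ':
--         return strlist
--
--     ret = strlist
--     for q in queries:
--         ret = [line for line in ret if q in line.lower()]
--     return ret
-- ===== Notes on version B (the rewrite author's own statement) =====
-- stated objective: faster
-- what changed: Transposed the loop nesting: instead of testing every query against each line (inner loop with break), B keeps the guards and then narrows the surviving line list with one filtering pass per query, so later queries scan only lines that already matched.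
import Mathlib
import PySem

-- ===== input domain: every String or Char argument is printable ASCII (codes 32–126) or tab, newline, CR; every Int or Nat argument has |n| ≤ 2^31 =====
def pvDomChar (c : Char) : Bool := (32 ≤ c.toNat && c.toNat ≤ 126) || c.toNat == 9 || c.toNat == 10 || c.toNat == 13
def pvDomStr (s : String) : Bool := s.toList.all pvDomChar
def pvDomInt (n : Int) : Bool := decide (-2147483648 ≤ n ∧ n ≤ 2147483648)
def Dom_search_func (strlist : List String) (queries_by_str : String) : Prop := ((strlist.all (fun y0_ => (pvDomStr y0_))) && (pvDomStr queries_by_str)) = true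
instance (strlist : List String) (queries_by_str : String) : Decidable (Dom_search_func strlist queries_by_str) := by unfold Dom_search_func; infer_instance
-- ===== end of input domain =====

-- B replaces A's per-line inner query loop by one filtering pass per query (progressive narrowing); same results.

-- ===== PORT A =====
-- inner 'for query in queries: if line.find(query)==-1: is_matched=False; break'
def pvMatchedAll (line : String) : List String → Bool
  | [] => true
  | q :: rest => if PySem.Str.find line q == -1 then false else pvMatchedAll line rest

def search_func (strlist : List String) (queries_by_str : String) : List String :=
  let queries := (PySem.Str.split? queries_by_str " ").getD []   -- sep " " is nonempty, so split? is always some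
  match queries with
  | [] => strlist
  | firstq :: _ =>
    if PySem.Str.len firstq == 0 then strlist
    else if PySem.Str.pyGet? firstq 0 == some ' ' then strlist
    else
      strlist.foldl (fun ret original_line =>
        let line := PySem.Str.lower original_line
        if pvMatchedAll line queries then ret ++ [original_line] else ret) []

-- ===== PORT B =====
def search_func_alt (strlist : List String) (queries_by_str : String) : List String :=
  let queries := (PySem.Str.split? queries_by_str " ").getD []   -- sep " " is nonempty, so split? is always some
  match queries with
  | [] => strlist
  | firstq :: _ =>
    if PySem.Str.len firstq == 0 then strlist
    else if PySem.Str.pyGet? firstq 0 == some ' ' then strlist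
    else
      queries.foldl (fun ret q => ret.filter (fun line => PySem.Str.isIn q (PySem.Str.lower line))) strlist

-- ===== PRECONDITION & SPEC =====
def Spec_search_func (strlist : List String) (queries_by_str : String) (out : List String) : Prop := out = search_func_alt strlist queries_by_str
instance (strlist : List String) (queries_by_str : String) (out : List String) : Decidable (Spec_search_func strlist queries_by_str out) := by unfold Spec_search_func; infer_instance

-- ===== CLAIM (what is proved, stated in full; the proofs are below) =====
def Claim_equal_search_func : Prop := ∀ (strlist : List String) (queries_by_str : String), Dom_search_func strlist queries_by_str → Spec_search_func strlist queries_by_str (search_func strlist queries_by_str)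

-- ===== LEMMAS AND PROOFS =====

-- 'q in line' is the Boolean negation of 'line.find(q) == -1'
lemma pvMatchedAll_cons (line q : String) (rest : List String) :
    pvMatchedAll line (q :: rest)
      = (PySem.Str.isIn q line && pvMatchedAll line rest) := by
  by_cases h : q.toList <:+: line.toList
  · have h1 : PySem.Chars.isIn q.toList line.toList = true :=
      (PySem.Chars.isIn_iff_infix _ _).mpr h
    have h2 : PySem.Chars.find line.toList q.toList ≠ -1 :=
      (PySem.Chars.find_ne_neg_one_iff _ _).mpr h
    simp [pvMatchedAll, PySem.Str.find_eq, h1, h2]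
  · have h1 : PySem.Chars.isIn q.toList line.toList = false := (PySem.Chars.isIn_eq_false_iff _ _).mpr h
    have h2 : PySem.Chars.find line.toList q.toList = -1 :=
      (PySem.Chars.find_eq_neg_one_iff _ _).mpr h
    simp [pvMatchedAll, PySem.Str.find_eq, h1, h2]

-- conjunction-filter = sequential narrowing, the heart of the equivalence
lemma pv_filter_matchedAll (qs : List String) :
    ∀ xs : List String,
      xs.filter (fun l => pvMatchedAll (PySem.Str.lower l) qs)
        = qs.foldl (fun ret q => ret.filter (fun line => PySem.Str.isIn q (PySem.Str.lower line))) xs := by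
  induction qs with
  | nil => intro xs; simp [pvMatchedAll]
  | cons q rest ih =>
    intro xs
    rw [List.foldl_cons, ← ih]
    rw [List.filter_filter]
    apply List.filter_congr
    intro l _
    rw [pvMatchedAll_cons, Bool.and_comm]

-- ===== VERDICT (by name: the statement is the Claim_ definition above) =====
theorem search_func_spec : Claim_equal_search_func := by
  intro strlist queries_by_str _
  unfold Spec_search_func search_func search_func_alt
  cases hq : (PySem.Str.split? queries_by_str " ").getD [] with
  | nil => rfl
  | cons firstq rest =>
    simp only
    split
    · rfl
    split
    · rfl
    rw [PySem.List.foldl_append_if_eq_filter]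
    simpa using pv_filter_matchedAll (firstq :: rest) strlist
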